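-- pv_equiv track=rewrite | github.com/rossmmurray/CodeWarsChallenges | nameFormat.py | namelist2
-- ===== SOURCE A (Python) =====
-- def namelist2(names):
-- 	names_list = [name_dict['name'] for name_dict in names]
-- 	if len(names) == 0:
-- 		return ''
-- 	if len(names) == 1:
-- 		return names_list[0]
-- 	name_string = ', '.join(names_list[:-1]) + ' & ' + names_list[-1]
-- 	return name_string
-- ===== SOURCE B (Python) =====
-- def namelist2(names):
--     result = ''
--     last = len(names) - 1
--     for i, name_dict in enumerate(names):
--         if i == 0:
--             sep = ''
--         elif i == last:
--             sep = ' & '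
--         else:
--             sep = ', '
--         result += sep + name_dict['name']
--     return result
-- ===== Notes on version B (the rewrite author's own statement) =====
-- stated objective: alternative
-- what changed: Replaces A's 0/1/many special cases plus slice-and-join with a single enumerate loop that prepends a positionally chosen separator ('', ' & ', ', ') to each name and accumulates the result string.
import Mathlib
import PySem

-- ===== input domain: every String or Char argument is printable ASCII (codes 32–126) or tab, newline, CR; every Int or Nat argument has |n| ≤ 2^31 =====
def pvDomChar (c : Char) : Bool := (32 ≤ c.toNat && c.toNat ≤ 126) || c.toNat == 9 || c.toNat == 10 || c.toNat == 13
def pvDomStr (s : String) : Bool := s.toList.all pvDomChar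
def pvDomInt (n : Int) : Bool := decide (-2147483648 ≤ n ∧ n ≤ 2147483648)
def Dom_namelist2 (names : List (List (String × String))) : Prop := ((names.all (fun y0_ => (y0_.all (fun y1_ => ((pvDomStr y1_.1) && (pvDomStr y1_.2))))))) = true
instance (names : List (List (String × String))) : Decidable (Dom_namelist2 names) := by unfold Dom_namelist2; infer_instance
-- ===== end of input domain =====

-- B replaces A's 0/1/many special cases plus slice-and-join by a single enumerate
-- loop choosing each element's separator positionally (alternative decomposition, same cost).

-- ===== PORT A =====
def namelist2 (names : List (List (String × String))) : String :=
  let names_list := names.map (fun name_dict => PySem.Dict.getD (PySem.Dict.mk name_dict) "name" "")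
  if names.length == 0 then ""
  else if names.length == 1 then PySem.List.pyGetD names_list 0 ""
  else PySem.Str.join ", " (PySem.List.slice names_list none (some (-1))) ++ " & " ++ PySem.List.pyGetD names_list (-1) ""

-- ===== PORT B =====
def namelist2_alt (names : List (List (String × String))) : String :=
  let last : Int := (names.length : Int) - 1
  (PySem.List.enumerate names 0).foldl
    (fun result p =>
      let sep : String := if p.1 = 0 then "" else if p.1 = last then " & " else ", "
      result ++ (sep ++ PySem.Dict.getD (PySem.Dict.mk p.2) "name" ""))
    ""

-- ===== PRECONDITION & SPEC =====
-- Pre_ excludes inputs where some dict lacks the key "name": there both Pythons raise KeyError.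
def Pre_namelist2 (names : List (List (String × String))) : Prop :=
  ∀ d ∈ names, PySem.Dict.contains (PySem.Dict.mk d) "name" = true
instance (names : List (List (String × String))) : Decidable (Pre_namelist2 names) := by
  unfold Pre_namelist2; infer_instance
def pvWitness_namelist2 : (List (List (String × String))) := [[("name", "Bart")], [("name", "Lisa")]]

def Spec_namelist2 (names : List (List (String × String))) (out : String) : Prop := out = namelist2_alt names
instance (names : List (List (String × String))) (out : String) : Decidable (Spec_namelist2 names out) := by unfold Spec_namelist2; infer_instance

-- ===== CLAIM (what is proved, stated in full; the proofs are below) =====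
def Claim_equal_namelist2 : Prop := ∀ (names : List (List (String × String))), Dom_namelist2 names → Pre_namelist2 names → Spec_namelist2 names (namelist2 names)

-- ===== LEMMAS AND PROOFS =====

theorem strEq {s t : String} (h : s.toList = t.toList) : s = t := by
  have := congrArg String.ofList h
  simpa using this

-- the per-dict name lookup shared by both ports
def pvF (d : List (String × String)) : String := PySem.Dict.getD (PySem.Dict.mk d) "name" ""

-- the tail of the output after the first name: ", x" pieces, " & x" for the last
def pvMidS : List String → String
  | [] => ""
  | [a] => " & " ++ a
  | a :: b :: r => ", " ++ a ++ pvMidS (b :: r)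

theorem join_amp_eq_midS : ∀ (l : List String) (a : String), l ≠ [] →
    PySem.Str.join ", " ((a :: l).dropLast) ++ " & " ++ (a :: l).getLast (List.cons_ne_nil a l)
      = a ++ pvMidS l
  | [x], a, _ => by
    apply strEq
    simp [pvMidS, PySem.Str.toList_join, PySem.Chars.join_singleton]
  | x :: y :: r, a, _ => by
    have ih := join_amp_eq_midS (y :: r) x (by simp)
    apply strEq
    have ih' := congrArg String.toList ih
    simp [PySem.Str.toList_join, PySem.Chars.join_cons_cons, pvMidS,
      List.dropLast_cons₂] at ih' ⊢
    simp [ih']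
termination_by l => l.length

theorem foldB_eq_midS (last : Int) : ∀ (l : List (List (String × String))) (s : Int) (acc : String),
    1 ≤ s → s + l.length = last + 1 →
    (PySem.List.enumerate l s).foldl
      (fun result p =>
        result ++ ((if p.1 = 0 then "" else if p.1 = last then " & " else ", ")
          ++ PySem.Dict.getD (PySem.Dict.mk p.2) "name" "")) acc
      = acc ++ pvMidS (l.map pvF) := by
  intro l
  induction l with
  | nil =>
    intro s acc _ _
    apply strEq; simp [PySem.List.enumerate, pvMidS]
  | cons x r ih =>
    intro s acc hs hlen
    cases r with
    | nil =>
      have hs0 : ¬ s = 0 := by omega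
      have hsl : s = last := by simp at hlen; omega
      simp only [PySem.List.enumerate_cons, List.foldl_cons, PySem.List.enumerate_nil,
        List.foldl_nil, List.map_cons, List.map_nil, pvMidS, pvF]
      rw [if_neg hs0, if_pos hsl]
    | cons y r' =>
      have hs0 : ¬ s = 0 := by omega
      have hsl : ¬ s = last := by simp at hlen; omega
      have hrec := ih (s + 1) (acc ++ (", " ++ PySem.Dict.getD (PySem.Dict.mk x) "name" ""))
        (by omega) (by simp at hlen ⊢; omega)
      rw [PySem.List.enumerate_cons, List.foldl_cons, if_neg hs0, if_neg hsl, hrec]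
      apply strEq
      simp [pvMidS, pvF]

theorem namelist2_eq_alt : ∀ (names : List (List (String × String))),
    namelist2 names = namelist2_alt names := by
  intro names
  match names with
  | [] => rfl
  | [d] =>
    simp only [namelist2, namelist2_alt, List.length_cons, List.length_nil,
      PySem.List.enumerate_cons, PySem.List.enumerate_nil, List.foldl_cons, List.foldl_nil]
    norm_num [PySem.List.pyGetD_zero_cons]
  | d :: x :: r =>
    have h2 : ¬ (((d :: x :: r).length == 0) = true) := by simp
    have h1 : ¬ (((d :: x :: r).length == 1) = true) := by simp
    -- A side
    have hA : namelist2 (d :: x :: r)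
        = pvF d ++ pvMidS ((x :: r).map pvF) := by
      simp only [namelist2, List.map_cons]
      rw [if_neg h2, if_neg h1, PySem.List.slice_to_neg_one,
        PySem.List.pyGetD_neg_one (xs := PySem.Dict.getD (PySem.Dict.mk d) "name" "" ::
          PySem.Dict.getD (PySem.Dict.mk x) "name" "" ::
          r.map (fun name_dict => PySem.Dict.getD (PySem.Dict.mk name_dict) "name" ""))
          (h := by simp)]
      have h := join_amp_eq_midS (pvF x :: r.map pvF) (pvF d) (by simp)
      simp only [List.dropLast_cons₂, pvF] at h ⊢
      exact h
    -- B side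
    have hB : namelist2_alt (d :: x :: r)
        = pvF d ++ pvMidS ((x :: r).map pvF) := by
      have hrec := foldB_eq_midS (((d :: x :: r).length : Int) - 1) (x :: r) 1
        ("" ++ ("" ++ PySem.Dict.getD (PySem.Dict.mk d) "name" ""))
        (by omega) (by simp; omega)
      simp only [namelist2_alt]
      rw [PySem.List.enumerate_cons, List.foldl_cons]
      rw [if_pos rfl]
      rw [show (0 : Int) + 1 = 1 from rfl]
      rw [hrec]
      apply strEq; simp [pvF]
    rw [hA, hB]

-- ===== VERDICT (by name: the statement is the Claim_ definition above) =====
theorem namelist2_spec : Claim_equal_namelist2 := by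
  intro names _ _
  unfold Spec_namelist2
  exact namelist2_eq_alt names
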